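-- pv_equiv track=rewrite | github.com/khudian/khudian.github.io | MathBlog/libs/python/converterTool.py | checkCaretInsideFormula
-- ===== SOURCE A (Python) =====
-- def checkCaretInsideFormula(data, caretIdx):
--   result = False
--   dataStripped = data[:caretIdx + 1]
--   currentIdx = 0;
--   while (True):
--     fIdx1 = dataStripped.find("$", currentIdx)
--     fIdx2 = dataStripped.find("$$", currentIdx)
--
--     if (fIdx1 == -1) and (fIdx2 == -1):
--       return result
--
--     if (fIdx1 == fIdx2):
--       currentIdx = fIdx1 + 2
--     else:
--       currentIdx = fIdx1 + 1
--
--     result = not result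
-- ===== SOURCE B (Python) =====
-- import re
--
-- def checkCaretInsideFormula(data, caretIdx):
--   prefix = data[:caretIdx + 1]
--   tokens = re.findall(r'\$\$|\$', prefix)
--   return len(tokens) % 2 == 1
-- ===== Notes on version B (the rewrite author's own statement) =====
-- stated objective: idiomatic
-- what changed: Replaces A's stateful while-loop (two find calls per iteration plus a result toggle) by tokenizing the prefix once with re.findall(r'\$\$|\$') and returning the parity of the token count.
import Mathlib
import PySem

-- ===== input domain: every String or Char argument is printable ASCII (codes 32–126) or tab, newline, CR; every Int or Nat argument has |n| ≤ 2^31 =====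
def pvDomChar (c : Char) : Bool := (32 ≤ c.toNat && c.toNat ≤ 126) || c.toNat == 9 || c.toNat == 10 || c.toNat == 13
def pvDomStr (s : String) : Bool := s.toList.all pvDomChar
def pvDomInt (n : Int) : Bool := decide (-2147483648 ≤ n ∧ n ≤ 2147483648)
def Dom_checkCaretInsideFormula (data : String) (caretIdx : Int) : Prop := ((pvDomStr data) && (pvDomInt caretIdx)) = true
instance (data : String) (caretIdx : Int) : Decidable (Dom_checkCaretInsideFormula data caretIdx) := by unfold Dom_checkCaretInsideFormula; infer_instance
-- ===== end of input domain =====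

-- B replaces A's find-and-toggle while loop by tokenizing the prefix once (regex \$\$|\$) and
-- returning the parity of the token count (objective: idiomatic; same cost).

-- ===== PORT A =====
-- A's `while True` loop, transliterated with fuel (stripped.length + 1 iterations always
-- suffice: each non-returning iteration moves currentIdx past at least one character).
def pvALoop (cs : List Char) : Nat → Int → Bool → Bool
  | 0, _, r => r
  | fuel + 1, currentIdx, r =>
    let fIdx1 := PySem.Chars.findFrom cs ['$'] currentIdx none
    let fIdx2 := PySem.Chars.findFrom cs ['$', '$'] currentIdx none
    if fIdx1 = -1 ∧ fIdx2 = -1 then r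
    else if fIdx1 = fIdx2 then pvALoop cs fuel (fIdx1 + 2) (!r)
    else pvALoop cs fuel (fIdx1 + 1) (!r)

def checkCaretInsideFormula (data : String) (caretIdx : Int) : Bool :=
  let dataStripped := PySem.Chars.slice data.toList none (some (caretIdx + 1))
  pvALoop dataStripped (dataStripped.length + 1) 0 false

-- ===== PORT B =====
-- re.findall(r'\$\$|\$', prefix): left-to-right, non-overlapping, '$$' preferred over '$'.
def pvFindall : List Char → List (List Char)
  | '$' :: '$' :: rest => ['$', '$'] :: pvFindall rest
  | '$' :: rest => ['$'] :: pvFindall rest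
  | _ :: rest => pvFindall rest
  | [] => []

def checkCaretInsideFormula_alt (data : String) (caretIdx : Int) : Bool :=
  let pfx := PySem.Chars.slice data.toList none (some (caretIdx + 1))
  (pvFindall pfx).length % 2 == 1

-- ===== PRECONDITION & SPEC =====
def Spec_checkCaretInsideFormula (data : String) (caretIdx : Int) (out : Bool) : Prop := out = checkCaretInsideFormula_alt data caretIdx
instance (data : String) (caretIdx : Int) (out : Bool) : Decidable (Spec_checkCaretInsideFormula data caretIdx out) := by unfold Spec_checkCaretInsideFormula; infer_instance

-- ===== CLAIM (what is proved, stated in full; the proofs are below) =====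
def Claim_equal_checkCaretInsideFormula : Prop := ∀ (data : String) (caretIdx : Int), Dom_checkCaretInsideFormula data caretIdx → Spec_checkCaretInsideFormula data caretIdx (checkCaretInsideFormula data caretIdx)

-- ===== LEMMAS AND PROOFS =====

theorem pv_singleton_prefix_iff (a : Char) (l : List Char) : [a] <+: l ↔ l.head? = some a := by
  cases l with
  | nil => simp
  | cons x xs => simp [List.cons_prefix_iff]

theorem pv_pair_prefix_iff (a b : Char) (l : List Char) : [a, b] <+: l ↔ ∃ t, l = a :: b :: t := by
  cases l with
  | nil => simp
  | cons x xs => cases xs <;> simp [List.cons_prefix_iff]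

theorem pv_findall_cons_ne (c : Char) (rest : List Char) (hc : c ≠ '$') :
    pvFindall (c :: rest) = pvFindall rest := by
  rw [pvFindall.eq_def]
  split <;> simp_all

theorem pv_findall_no_dollar (d : List Char) (h : '$' ∉ d) : pvFindall d = [] := by
  induction d with
  | nil => rfl
  | cons c rest ih =>
    have hc : c ≠ '$' := fun hcc => h (hcc ▸ List.mem_cons_self)
    rw [pv_findall_cons_ne c rest hc]
    exact ih fun hm => h (List.mem_cons_of_mem _ hm)

theorem pv_findall_append (pre l : List Char) (h : '$' ∉ pre) :
    pvFindall (pre ++ l) = pvFindall l := by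
  induction pre with
  | nil => rfl
  | cons c rest ih =>
    have hc : c ≠ '$' := fun hcc => h (hcc ▸ List.mem_cons_self)
    rw [List.cons_append, pv_findall_cons_ne c (rest ++ l) hc]
    exact ih fun hm => h (List.mem_cons_of_mem _ hm)

theorem pv_findall_dollar_single (t : List Char) (h : t.head? ≠ some '$') :
    pvFindall ('$' :: t) = ['$'] :: pvFindall t := by
  cases t with
  | nil => rfl
  | cons c r =>
    simp only [List.head?] at h
    have hc : c ≠ '$' := fun hcc => h (by rw [hcc])
    simp [pvFindall, hc]

theorem pv_parity_flip (r : Bool) (n : Nat) :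
    (r != ((n + 1) % 2 == 1)) = ((!r) != (n % 2 == 1)) := by
  rcases Nat.mod_two_eq_zero_or_one n with h | h <;>
    cases r <;> simp [Nat.add_mod, h]

-- A's loop computes r xor the token-count parity of the not-yet-scanned suffix.
theorem pv_loop_eq (fuel : Nat) : ∀ (cs : List Char) (k : Nat) (r : Bool),
    k ≤ cs.length → cs.length - k < fuel →
    pvALoop cs fuel (k : Int) r = (r != ((pvFindall (cs.drop k)).length % 2 == 1)) := by
  induction fuel with
  | zero => intro cs k r hk hf; omega
  | succ fuel ih =>
    intro cs k r hk hf
    set d := cs.drop k with hd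
    have hdlen : d.length = cs.length - k := by simp [hd]
    have hf1 : PySem.Chars.findFrom cs ['$'] (k : Int) none =
        if PySem.Chars.find d ['$'] = -1 then -1 else (k : Int) + PySem.Chars.find d ['$'] :=
      PySem.Chars.findFrom_natCast cs ['$'] k hk
    have hf2 : PySem.Chars.findFrom cs ['$', '$'] (k : Int) none =
        if PySem.Chars.find d ['$', '$'] = -1 then -1 else (k : Int) + PySem.Chars.find d ['$', '$'] :=
      PySem.Chars.findFrom_natCast cs ['$', '$'] k hk
    by_cases hnone : PySem.Chars.find d ['$'] = -1
    · -- no '$' in the suffix: A returns r, the token list of the suffix is empty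
      have hmem : '$' ∉ d := by
        have := (PySem.Chars.find_eq_neg_one_iff (s := d) (sub := ['$'])).mp hnone
        exact fun hm => this ((List.singleton_infix_iff _ _).mpr hm)
      have hnone2 : PySem.Chars.find d ['$', '$'] = -1 := by
        rw [PySem.Chars.find_eq_neg_one_iff]
        intro hinf
        have h1 : [('$' : Char)] <:+: ['$', '$'] := ⟨[], ['$'], rfl⟩
        exact ((PySem.Chars.find_eq_neg_one_iff (s := d) (sub := ['$'])).mp hnone)
          (List.IsInfix.trans h1 hinf)
      simp only [pvALoop, hf1, hf2, hnone, hnone2]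
      simp [pv_findall_no_dollar d hmem]
    · -- a first '$' at index j of the suffix
      have hge : 0 ≤ PySem.Chars.find d ['$'] := by
        have := PySem.Chars.neg_one_le_find (s := d) (sub := ['$'])
        omega
      set j : Nat := (PySem.Chars.find d ['$']).toNat with hj
      have hjeq : PySem.Chars.find d ['$'] = (j : Int) := by simp [hj, Int.toNat_of_nonneg hge]
      obtain ⟨hpre, hmin⟩ := PySem.Chars.find_spec (s := d) (sub := ['$']) hge
      rw [← hj] at hpre hmin
      obtain ⟨t, ht⟩ : ∃ t, d.drop j = '$' :: t := by
        have hh : (d.drop j).head? = some '$' := (pv_singleton_prefix_iff _ _).mp hpre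
        cases hdj : d.drop j with
        | nil => rw [hdj] at hh; cases hh
        | cons c rr => rw [hdj] at hh; simp at hh; exact ⟨rr, by rw [hh]⟩
      have hjlt : j < d.length := by
        by_contra hge'
        have hnil : d.drop j = [] := List.drop_eq_nil_of_le (by omega)
        rw [hnil] at ht; cases ht
      have htake : '$' ∉ d.take j := by
        intro hm
        obtain ⟨i, hi, hgi⟩ := List.getElem_of_mem hm
        have hij : i < j := by have := List.length_take_le j d; omega
        refine hmin i hij ?_
        rw [pv_singleton_prefix_iff, List.head?_drop]
        rw [List.getElem_take] at hgi
        rw [List.getElem?_eq_getElem (by omega)]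
        exact congrArg some hgi
      have hdsplit : d = d.take j ++ '$' :: t := by rw [← ht]; exact (List.take_append_drop j d).symm
      have hf1v : PySem.Chars.findFrom cs ['$'] (k : Int) none = (k : Int) + (j : Int) := by
        rw [hf1, if_neg hnone, hjeq]
      by_cases hdd : t.head? = some '$'
      · -- '$$' starts at j: fIdx1 = fIdx2 branch, currentIdx jumps by 2 past the pair
        obtain ⟨t2, ht2⟩ : ∃ t2, t = '$' :: t2 := by
          cases t with
          | nil => simp at hdd
          | cons c rr =>
            simp only [List.head?_cons, Option.some.injEq] at hdd
            exact ⟨rr, by rw [hdd]⟩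
        have hddpre : ['$', '$'] <+: d.drop j := by rw [ht, ht2]; exact ⟨t2, rfl⟩
        have hfind2 : PySem.Chars.find d ['$', '$'] = (j : Int) := by
          have hinf : ['$', '$'] <:+: d := by
            refine ⟨d.take j, t2, ?_⟩
            conv_rhs => rw [hdsplit]
            rw [ht2, List.append_assoc]
            exact rfl
          have hge2 : 0 ≤ PySem.Chars.find d ['$', '$'] :=
            (PySem.Chars.find_nonneg_iff (s := d) (sub := ['$', '$'])).mpr hinf
          set m : Nat := (PySem.Chars.find d ['$', '$']).toNat with hm
          obtain ⟨hpre2, hmin2⟩ := PySem.Chars.find_spec (s := d) (sub := ['$', '$']) hge2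
          rw [← hm] at hpre2 hmin2
          have hmj : m ≤ j := by
            by_contra hlt
            exact hmin2 j (by omega) hddpre
          have hjm : j ≤ m := by
            by_contra hlt
            have hsing : [('$' : Char)] <+: d.drop m := by
              rcases (pv_pair_prefix_iff '$' '$' (d.drop m)).mp hpre2 with ⟨u, hu⟩
              rw [pv_singleton_prefix_iff, hu]; rfl
            exact hmin m (by omega) hsing
          omega
        have hf2v : PySem.Chars.findFrom cs ['$', '$'] (k : Int) none = (k : Int) + (j : Int) := by
          rw [hf2, hfind2]
          have hne : ((j : Int)) ≠ -1 := by omega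
          simp [hne]
        have hjlen : j + 2 ≤ d.length := by
          have hlen : (d.drop j).length = d.length - j := List.length_drop ..
          rw [ht, ht2] at hlen; simp at hlen; omega
        have hrec := ih cs (k + j + 2) (!r) (by omega) (by omega)
        have hdrop : cs.drop (k + j + 2) = t2 := by
          have hdd2 : cs.drop (k + j + 2) = (d.drop j).drop 2 := by
            rw [hd, List.drop_drop, List.drop_drop]; ring_nf
          rw [hdd2, ht, ht2]; rfl
        simp only [pvALoop, hf1v, hf2v]
        rw [if_neg (by omega)]
        simp only [if_true]
        have hcast : (k : Int) + (j : Int) + 2 = ((k + j + 2 : Nat) : Int) := by push_cast; ring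
        rw [hcast, hrec, hdrop]
        have htok : pvFindall d = ['$', '$'] :: pvFindall t2 := by
          rw [hdsplit, ht2, pv_findall_append _ _ htake]; rfl
        rw [htok]
        simp only [List.length_cons]
        exact (pv_parity_flip r (pvFindall t2).length).symm
      · -- lone '$' at j: fIdx1 ≠ fIdx2 branch, currentIdx moves by 1
        have hne : PySem.Chars.findFrom cs ['$', '$'] (k : Int) none ≠ (k : Int) + (j : Int) := by
          rw [hf2]
          split
          · intro habs; omega
          · intro habs
            have hge2 : 0 ≤ PySem.Chars.find d ['$', '$'] := by
              have := PySem.Chars.neg_one_le_find (s := d) (sub := ['$', '$'])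
              omega
            have hfj : PySem.Chars.find d ['$', '$'] = (j : Int) := by omega
            obtain ⟨hpre2, hmin2⟩ := PySem.Chars.find_spec (s := d) (sub := ['$', '$']) hge2
            rw [hfj] at hpre2
            simp only [Int.toNat_natCast] at hpre2
            rcases (pv_pair_prefix_iff '$' '$' (d.drop j)).mp hpre2 with ⟨u, hu⟩
            rw [ht] at hu
            cases hu
            simp at hdd
        have hrec := ih cs (k + j + 1) (!r) (by omega) (by omega)
        have hdrop : cs.drop (k + j + 1) = t := by
          have hdd1 : cs.drop (k + j + 1) = (d.drop j).drop 1 := by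
            rw [hd, List.drop_drop, List.drop_drop]; ring_nf
          rw [hdd1, ht]; rfl
        simp only [pvALoop, hf1v]
        rw [if_neg (by omega), if_neg (fun h => hne h.symm)]
        have hcast : (k : Int) + (j : Int) + 1 = ((k + j + 1 : Nat) : Int) := by push_cast; ring
        rw [hcast, hrec, hdrop]
        have htok : pvFindall d = ['$'] :: pvFindall t := by
          rw [hdsplit, pv_findall_append _ _ htake]
          exact pv_findall_dollar_single t hdd
        rw [htok]
        simp only [List.length_cons]
        exact (pv_parity_flip r (pvFindall t).length).symm

-- ===== VERDICT (by name: the statement is the Claim_ definition above) =====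
theorem checkCaretInsideFormula_spec : Claim_equal_checkCaretInsideFormula := by
  intro data caretIdx _
  unfold Spec_checkCaretInsideFormula checkCaretInsideFormula checkCaretInsideFormula_alt
  set s := PySem.Chars.slice data.toList none (some (caretIdx + 1))
  have h := pv_loop_eq (s.length + 1) s 0 false (by omega) (by omega)
  simpa using h
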